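-- pv_equiv track=rewrite | github.com/zzzbitz/prepbench | src/draw/plot_statistics.py | _build_log_ticks
-- ===== SOURCE A (Python) =====
-- from typing import Dict, List, Tuple
--
-- def _build_log_ticks(min_val: int, max_val: int) -> List[int]:
--     if max_val < 1:
--         return []
--     min_val = max(1, min_val)
--     ticks: List[int] = []
--     power = 0
--     while 10 ** power < min_val:
--         power += 1
--     while True:
--         tick = 10 ** power
--         if tick > max_val:
--             break
--         ticks.append(tick)
--         power += 1
--     return ticks
-- ===== SOURCE B (Python) =====
-- from typing import List
--
-- def _build_log_ticks(min_val: int, max_val: int) -> List[int]: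
--     if max_val < 1:
--         return []
--     lo = max(1, min_val)
--     d = len(str(lo))
--     start = d - 1 if lo == 10 ** (d - 1) else d
--     end = len(str(max_val)) - 1
--     return [10 ** p for p in range(start, end + 1)]
-- ===== Notes on version B (the rewrite author's own statement) =====
-- stated objective: simpler
-- what changed: Replaces both while loops by a closed-form computation of the exponent bounds from decimal digit counts (len(str(.))) followed by a single comprehension over range(start, end+1).
import Mathlib
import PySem

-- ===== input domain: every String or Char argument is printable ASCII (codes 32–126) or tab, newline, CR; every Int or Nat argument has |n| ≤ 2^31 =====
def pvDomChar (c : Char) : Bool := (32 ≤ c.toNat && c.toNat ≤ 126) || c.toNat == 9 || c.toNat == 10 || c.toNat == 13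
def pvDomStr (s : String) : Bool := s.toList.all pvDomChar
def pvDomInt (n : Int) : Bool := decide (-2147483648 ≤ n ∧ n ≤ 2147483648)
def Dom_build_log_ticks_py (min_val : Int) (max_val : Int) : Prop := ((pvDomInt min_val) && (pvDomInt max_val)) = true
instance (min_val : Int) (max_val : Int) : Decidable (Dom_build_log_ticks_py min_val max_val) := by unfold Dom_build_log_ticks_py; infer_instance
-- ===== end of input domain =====

-- B replaces A's two while loops by closed-form exponent bounds read off decimal digit counts; objective: simpler.


-- ===== PORT A =====
-- first while loop: advance power while 10 ** power < min_val
-- (fuel only makes the recursion structural; fuel 100 is proven sufficient on the claimed domain)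
def buildLogTicksLoop1 (min_val : Int) (power : Nat) : Nat → Nat
  | 0 => power
  | fuel + 1 =>
    if (10:Int) ^ power < min_val then buildLogTicksLoop1 min_val (power + 1) fuel else power

-- second while loop: append 10 ** power while it does not exceed max_val
def buildLogTicksLoop2 (max_val : Int) (power : Nat) (ticks : List Int) : Nat → List Int
  | 0 => ticks
  | fuel + 1 =>
    if (10:Int) ^ power > max_val then ticks
    else buildLogTicksLoop2 max_val (power + 1) (ticks ++ [(10:Int) ^ power]) fuel

def build_log_ticks_py (min_val : Int) (max_val : Int) : List Int :=
  if max_val < 1 then []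
  else
    let min_val := max 1 min_val
    buildLogTicksLoop2 max_val (buildLogTicksLoop1 min_val 0 100) [] 100

-- ===== PORT B =====
def build_log_ticks_py_alt (min_val : Int) (max_val : Int) : List Int :=
  if max_val < 1 then []
  else
    let lo := max 1 min_val
    let d : Int := ((PySem.Int.toChars lo).length : Int)
    let start : Int := if lo = (10:Int) ^ (d - 1).toNat then d - 1 else d
    let «end» : Int := ((PySem.Int.toChars max_val).length : Int) - 1
    (PySem.List.pyRange start («end» + 1) 1).map (fun p => (10:Int) ^ p.toNat)

-- ===== PRECONDITION & SPEC =====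
def Spec_build_log_ticks_py (min_val : Int) (max_val : Int) (out : List Int) : Prop := out = build_log_ticks_py_alt min_val max_val
instance (min_val : Int) (max_val : Int) (out : List Int) : Decidable (Spec_build_log_ticks_py min_val max_val out) := by unfold Spec_build_log_ticks_py; infer_instance

-- ===== CLAIM (what is proved, stated in full; the proofs are below) =====
def Claim_equal_build_log_ticks_py : Prop := ∀ (min_val : Int) (max_val : Int), Dom_build_log_ticks_py min_val max_val → Spec_build_log_ticks_py min_val max_val (build_log_ticks_py min_val max_val)

-- ===== LEMMAS AND PROOFS =====

-- exact length of Nat.toDigits 10 n for positive n: number of decimal digits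
lemma toDigitsCore_length_exact (f : Nat) : ∀ (n : Nat) (l : List Char), 0 < n → n < 10 ^ f →
    (Nat.toDigitsCore 10 f n l).length = Nat.log 10 n + 1 + l.length := by
  induction f with
  | zero => intro n l h1 h2; omega
  | succ f ih =>
    intro n l h1 h2
    simp only [Nat.toDigitsCore]
    by_cases hd : n / 10 = 0
    · have hn : n < 10 := by omega
      have hlog : Nat.log 10 n = 0 := Nat.log_eq_zero_iff.mpr (Or.inl hn)
      simp [hd, hlog]
      omega
    · simp only [hd, if_false]
      have h1' : 0 < n / 10 := Nat.pos_of_ne_zero hd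
      have h2' : n / 10 < 10 ^ f := by
        have hlt : n < 10 * 10 ^ f := by rw [← pow_succ']; exact h2
        exact Nat.div_lt_of_lt_mul hlt
      rw [ih (n / 10) _ h1' h2']
      have hn10 : 10 ≤ n := by
        by_contra h
        exact hd (Nat.div_eq_of_lt (by omega))
      have hdiv : Nat.log 10 (n / 10) = Nat.log 10 n - 1 := Nat.log_div_base 10 n
      have hpos : 0 < Nat.log 10 n := Nat.log_pos (by norm_num) hn10
      simp only [List.length_cons]
      omega

lemma toDigits_length_exact (n : Nat) (h : 0 < n) :
    (Nat.toDigits 10 n).length = Nat.log 10 n + 1 := by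
  have hb : n < 10 ^ (n + 1) := by
    calc n < 2 ^ n := Nat.lt_two_pow_self
    _ ≤ 2 ^ (n + 1) := Nat.pow_le_pow_right (by norm_num) (by omega)
    _ ≤ 10 ^ (n + 1) := Nat.pow_le_pow_left (by norm_num) _
  have := toDigitsCore_length_exact (n + 1) n [] h hb
  simpa [Nat.toDigits] using this

lemma toChars_length_pos (n : Int) (h : 1 ≤ n) :
    ((PySem.Int.toChars n).length : Int) = (Nat.log 10 n.toNat : Int) + 1 := by
  simp [PySem.Int.toChars, show ¬ n < 0 by omega, toDigits_length_exact n.toNat (by omega)]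

-- characterization of loop 1
lemma loop1_eq (lo : Int) (S : Nat) (h1 : lo ≤ (10:Int) ^ S)
    (h2 : ∀ q : Nat, q < S → (10:Int) ^ q < lo) :
    ∀ (fuel p : Nat), p ≤ S → S ≤ p + fuel → buildLogTicksLoop1 lo p fuel = S := by
  intro fuel
  induction fuel with
  | zero =>
    intro p hp hf
    simp only [buildLogTicksLoop1]
    omega
  | succ fuel ih =>
    intro p hp hf
    simp only [buildLogTicksLoop1]
    by_cases hc : (10:Int) ^ p < lo
    · have hplt : p < S := by
        rcases Nat.lt_or_ge p S with h | h
        · exact h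
        · have : p = S := by omega
          subst this; omega
      simp only [hc, if_true]
      exact ih (p + 1) (by omega) (by omega)
    · have hpS : p = S := by
        by_contra h
        exact hc (h2 p (by omega))
      subst hpS
      simp [show ¬ (10:Int) ^ p < lo from hc]

-- characterization of loop 2
lemma loop2_eq (max_val : Int) (hmv : 1 ≤ max_val) :
    ∀ (fuel p : Nat) (acc : List Int), Nat.log 10 max_val.toNat < p + fuel →
      buildLogTicksLoop2 max_val p acc fuel =
        acc ++ (PySem.List.pyRange (p : Int) ((Nat.log 10 max_val.toNat : Int) + 1) 1).map
          (fun q => (10:Int) ^ q.toNat) := by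
  have hiff : ∀ q : Nat, ((10:Int) ^ q ≤ max_val ↔ q ≤ Nat.log 10 max_val.toNat) := by
    intro q
    have hcast : ((10:Int) ^ q ≤ max_val) ↔ (10 ^ q ≤ max_val.toNat) := by
      rw [← Int.toNat_of_nonneg (by omega : (0:Int) ≤ max_val)]
      exact_mod_cast Iff.rfl
    rw [hcast]
    exact (Nat.le_log_iff_pow_le (by norm_num) (by omega)).symm
  intro fuel
  induction fuel with
  | zero =>
    intro p acc hf
    rw [PySem.List.pyRange_one_eq_nil (by exact_mod_cast by omega : ((Nat.log 10 max_val.toNat : Int) + 1) ≤ (p : Int))]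
    simp [buildLogTicksLoop2]
  | succ fuel ih =>
    intro p acc hf
    simp only [buildLogTicksLoop2]
    by_cases hc : (10:Int) ^ p > max_val
    · have hle : Nat.log 10 max_val.toNat < p := by
        by_contra h
        exact absurd ((hiff p).mpr (by omega)) (not_le.mpr hc)
      rw [PySem.List.pyRange_one_eq_nil (by exact_mod_cast hle)]
      simp [hc]
    · simp only [hc, if_false]
      have hlt : (p : Int) < (Nat.log 10 max_val.toNat : Int) + 1 := by
        have := (hiff p).mp (not_lt.mp hc)
        exact_mod_cast by omega
      rw [PySem.List.pyRange_one_cons hlt, List.map_cons, ih (p + 1) _ (by omega)]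
      push_cast
      simp

-- ===== VERDICT (by name: the statement is the Claim_ definition above) =====
theorem build_log_ticks_py_spec : Claim_equal_build_log_ticks_py := by
  intro min_val max_val hdom
  unfold Spec_build_log_ticks_py build_log_ticks_py build_log_ticks_py_alt
  by_cases hmv : max_val < 1
  · simp [hmv]
  · simp only [hmv, if_false]
    have hmv1 : 1 ≤ max_val := by omega
    set lo : Int := max 1 min_val with hlo_def
    have hlo : 1 ≤ lo := le_max_left 1 min_val
    set L : Nat := Nat.log 10 lo.toNat with hL_def
    have hd : ((PySem.Int.toChars lo).length : Int) = (L : Int) + 1 := toChars_length_pos lo hlo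
    have hdm : ((PySem.Int.toChars max_val).length : Int) = (Nat.log 10 max_val.toNat : Int) + 1 :=
      toChars_length_pos max_val hmv1
    have hLle : (10:Int) ^ L ≤ lo := by
      have := Nat.pow_log_le_self 10 (by omega : lo.toNat ≠ 0)
      rw [← Int.toNat_of_nonneg (by omega : (0:Int) ≤ lo)]
      exact_mod_cast this
    have hLlt : lo < (10:Int) ^ (L + 1) := by
      have := Nat.lt_pow_succ_log_self (by norm_num : 1 < 10) lo.toNat
      rw [← Int.toNat_of_nonneg (by omega : (0:Int) ≤ lo)]
      exact_mod_cast this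
    have hidx : (((L : Int) + 1 - 1).toNat) = L := by omega
    simp only [hd, hdm, hidx]
    have hdomB : min_val ≤ 2147483648 ∧ max_val ≤ 2147483648 := by
      simp only [Dom_build_log_ticks_py, pvDomInt, Bool.and_eq_true, decide_eq_true_eq] at hdom
      omega
    have hLsmall : L < 99 := by
      have : lo.toNat < 10 ^ 10 := by
        have : lo ≤ 2147483648 := by omega
        omega
      have := Nat.log_lt_of_lt_pow (by omega : lo.toNat ≠ 0) this
      omega
    have hMsmall : Nat.log 10 max_val.toNat < 99 := by
      have : max_val.toNat < 10 ^ 10 := by omega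
      have := Nat.log_lt_of_lt_pow (by omega : max_val.toNat ≠ 0) this
      omega
    by_cases heq : lo = (10:Int) ^ L
    · have hloop1 : buildLogTicksLoop1 lo 0 100 = L := by
        apply loop1_eq lo L (le_of_eq heq) _ 100 0 (by omega) (by omega)
        intro q hq
        calc (10:Int) ^ q < 10 ^ L := pow_lt_pow_right₀ (by norm_num) hq
        _ = lo := heq.symm
      rw [hloop1, loop2_eq max_val hmv1 100 L [] (by omega)]
      simp [heq]
    · have hloop1 : buildLogTicksLoop1 lo 0 100 = L + 1 := by
        apply loop1_eq lo (L + 1) (le_of_lt hLlt) _ 100 0 (by omega) (by omega)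
        intro q hq
        calc (10:Int) ^ q ≤ 10 ^ L := pow_le_pow_right₀ (by norm_num) (by omega)
        _ < lo := lt_of_le_of_ne hLle (fun h => heq h.symm)
      rw [hloop1, loop2_eq max_val hmv1 100 (L + 1) [] (by omega)]
      simp [heq]
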